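-- pv_equiv track=rewrite | github.com/guyleafcloud/fantasy-cricket-leafcloud | backend/test_phase1b_real_api.py | extract_match_ids
-- ===== SOURCE A (Python) =====
-- def extract_match_ids(urls):
--     """Extract match IDs from URLs"""
--     match_ids = []
--     for url in urls:
--         # Format: https://matchcentre.kncb.nl/match/134453-7331235/scorecard/?period=2879394
--         parts = url.split('/')
--         for part in parts:
--             if '-' in part and part.startswith('134453'):
--                 match_ids.append(part)
--                 break
--     return match_ids
-- ===== SOURCE B (Python) =====
-- def _check(seg):
--     return '-' in seg and seg.startswith('134453')
--
--
-- def extract_match_ids(urls):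
--     """Extract match IDs from URLs (single character pass per URL, no split)"""
--     match_ids = []
--     for url in urls:
--         cur = ""
--         hit = None
--         for ch in url + "/":  # trailing sentinel terminates the last segment
--             if ch == '/':
--                 if _check(cur):
--                     hit = cur
--                     break
--                 cur = ""
--             else:
--                 cur += ch
--         if hit is not None:
--             match_ids.append(hit)
--     return match_ids
-- ===== Notes on version B (the rewrite author's own statement) =====
-- stated objective: alternative
-- what changed: Replaces split('/') plus an inner scan over the parts list by a single character pass per URL that builds the current segment and breaks at the first segment containing '-' and starting with '134453', never materialising the list of segments.
import Mathlib
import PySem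

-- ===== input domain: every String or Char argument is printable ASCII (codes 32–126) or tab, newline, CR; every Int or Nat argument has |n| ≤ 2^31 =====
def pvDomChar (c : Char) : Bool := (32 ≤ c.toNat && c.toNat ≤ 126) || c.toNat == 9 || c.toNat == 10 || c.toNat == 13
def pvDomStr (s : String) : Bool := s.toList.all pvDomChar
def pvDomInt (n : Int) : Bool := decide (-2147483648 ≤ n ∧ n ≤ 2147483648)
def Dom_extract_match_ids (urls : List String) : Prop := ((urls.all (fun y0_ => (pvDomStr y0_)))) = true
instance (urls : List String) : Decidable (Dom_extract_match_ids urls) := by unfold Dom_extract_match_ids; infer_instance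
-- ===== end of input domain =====

-- B replaces A's split('/')-then-scan-the-parts by a single character pass per URL with an
-- early break at the first qualifying segment (alternative decomposition, same cost).


-- ===== PORT A =====
-- inner loop "for part in parts: if '-' in part and part.startswith('134453'): append; break"
def pvInnerA : List (List Char) → List String → List String
  | [], acc => acc
  | p :: ps, acc =>
      if PySem.Chars.isIn ['-'] p && PySem.Chars.startswith p ['1','3','4','4','5','3'] then
        acc ++ [String.ofList p]
      else pvInnerA ps acc

-- url.split('/') with the nonempty literal separator is exactly PySem.Chars.splitOn
def extract_match_ids (urls : List String) : List String :=
  urls.foldl (fun acc url => pvInnerA (PySem.Chars.splitOn url.toList ['/']) acc) []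

-- ===== PORT B =====
-- the inner 'for ch in url + "/"' loop of Source B, with its break returning the hit
def pvScanB : List Char → List Char → Option (List Char)
  | [], _ => none
  | c :: rest, cur =>
      if c = '/' then
        if PySem.Chars.isIn ['-'] cur && PySem.Chars.startswith cur ['1','3','4','4','5','3'] then
          some cur
        else pvScanB rest []
      else pvScanB rest (cur ++ [c])

def extract_match_ids_alt (urls : List String) : List String :=
  urls.foldl (fun acc url =>
    match pvScanB (url.toList ++ ['/']) [] with
    | some hit => acc ++ [String.ofList hit]
    | none => acc) []

-- ===== PRECONDITION & SPEC =====
def Spec_extract_match_ids (urls : List String) (out : List String) : Prop := out = extract_match_ids_alt urls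
instance (urls : List String) (out : List String) : Decidable (Spec_extract_match_ids urls out) := by unfold Spec_extract_match_ids; infer_instance

-- ===== CLAIM (what is proved, stated in full; the proofs are below) =====
def Claim_equal_extract_match_ids : Prop := ∀ (urls : List String), Dom_extract_match_ids urls → Spec_extract_match_ids urls (extract_match_ids urls)

-- ===== LEMMAS AND PROOFS =====

-- reference splitter: splitOn on the single-char separator '/', carrying the current (in-order) segment
def pvSplit : List Char → List Char → List (List Char)
  | [], cur => [cur]
  | c :: rest, cur => if c = '/' then cur :: pvSplit rest [] else pvSplit rest (cur ++ [c])

theorem pvGo_eq_pvSplit (fuel : Nat) (l cur : List Char) (accs : List (List Char))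
    (h : l.length < fuel) :
    PySem.Chars.splitOn.go ['/'] fuel l cur accs = accs.reverse ++ pvSplit l cur.reverse := by
  induction fuel generalizing l cur accs with
  | zero => omega
  | succ f ih =>
    cases l with
    | nil => simp [PySem.Chars.splitOn.go, pvSplit]
    | cons c rest =>
      simp only [PySem.Chars.splitOn.go, List.isPrefixOf, Bool.and_true]
      by_cases hc : c = '/'
      · simp only [hc, beq_self_eq_true, if_pos, List.length_cons, List.drop_succ_cons,
          List.length_nil, List.drop_zero]
        rw [ih rest [] (cur.reverse :: accs) (by simp at h; omega)]
        simp [pvSplit]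
      · have hb : (('/' : Char) == c) = false := beq_eq_false_iff_ne.mpr (Ne.symm hc)
        simp only [hb, Bool.false_eq_true, if_neg, not_false_iff]
        rw [ih rest (c :: cur) accs (by simp at h; omega)]
        simp [pvSplit, hc]

theorem pvSplitOn_eq (cs : List Char) :
    PySem.Chars.splitOn cs ['/'] = pvSplit cs [] := by
  show PySem.Chars.splitOn.go ['/'] (cs.length + 1) cs [] [] = pvSplit cs []
  simpa using pvGo_eq_pvSplit (cs.length + 1) cs [] [] (by omega)

-- A's scan over the split parts equals B's char-level scan with the '/' sentinel
theorem pvInnerA_eq_pvScanB (l cur : List Char) (acc : List String) :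
    pvInnerA (pvSplit l cur) acc =
      (match pvScanB (l ++ ['/']) cur with
       | some hit => acc ++ [String.ofList hit]
       | none => acc) := by
  induction l generalizing cur with
  | nil =>
    simp only [pvSplit, List.nil_append, pvScanB]
    by_cases hk : (PySem.Chars.isIn ['-'] cur && PySem.Chars.startswith cur ['1','3','4','4','5','3']) = true
    · simp [pvInnerA, hk]
    · simp [pvInnerA, hk]
  | cons c rest ih =>
    by_cases hc : c = '/'
    · subst hc
      simp only [pvSplit, List.cons_append, pvScanB]
      by_cases hk : (PySem.Chars.isIn ['-'] cur && PySem.Chars.startswith cur ['1','3','4','4','5','3']) = true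
      · simp [pvInnerA, hk]
      · simp only [if_true, pvInnerA]
        rw [if_neg hk, if_neg hk]
        exact ih []
    · simp only [pvSplit, List.cons_append, pvScanB, if_neg hc]
      exact ih (cur ++ [c])

theorem pvPerUrl (url : String) (acc : List String) :
    pvInnerA (PySem.Chars.splitOn url.toList ['/']) acc =
      (match pvScanB (url.toList ++ ['/']) [] with
       | some hit => acc ++ [String.ofList hit]
       | none => acc) := by
  rw [pvSplitOn_eq]
  exact pvInnerA_eq_pvScanB url.toList [] acc

theorem pvFoldl_eq (urls : List String) (acc : List String) :
    urls.foldl (fun acc url => pvInnerA (PySem.Chars.splitOn url.toList ['/']) acc) acc =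
      urls.foldl (fun acc url =>
        match pvScanB (url.toList ++ ['/']) [] with
        | some hit => acc ++ [String.ofList hit]
        | none => acc) acc := by
  induction urls generalizing acc with
  | nil => rfl
  | cons u us ih => rw [List.foldl_cons, List.foldl_cons, pvPerUrl]; exact ih _

-- ===== VERDICT (by name: the statement is the Claim_ definition above) =====
theorem extract_match_ids_spec : Claim_equal_extract_match_ids := by
  intro urls _
  show extract_match_ids urls = extract_match_ids_alt urls
  exact pvFoldl_eq urls []
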